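-- pv_equiv track=rewrite | github.com/posl/comment_recommendation | script/mod_gen/3_time/zh/222_D/7.py | solve
-- ===== SOURCE A (Python) =====
-- def solve(n, a, b):
--     # dp[i][j] 表示第i位为j时的数量
--     dp = [[0 for j in range(3001)] for i in range(n+1)]
--     for i in range(1, n+1):
--         for j in range(a[i-1], b[i-1]+1):
--             if i == 1:
--                 dp[i][j] = 1
--             else:
--                 dp[i][j] = sum(dp[i-1][a[i-2]:j+1]) % 998244353
--     return sum(dp[n]) % 998244353
-- ===== SOURCE B (Python) =====
-- def solve(n, a, b):
--     M = 998244353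
--     if n == 0:
--         return 0
--     prev = [1 if a[0] <= j <= b[0] else 0 for j in range(3001)]
--     for i in range(1, n):
--         pref = 0
--         cur = []
--         for j in range(3001):
--             pref += prev[j]
--             cur.append(pref % M if a[i] <= j <= b[i] else 0)
--         prev = cur
--     return sum(prev) % M
-- ===== Notes on version B (the rewrite author's own statement) =====
-- stated objective: faster
-- what changed: B replaces the per-cell range-sum sum(dp[i-1][a[i-2]:j+1]) by a single running prefix sum swept once over the previous row, and keeps only one row instead of the whole (n+1)x3001 table.
-- outside the precondition, e.g. on solve(1, [-1], [-1]): A returns 1, B returns 0; on solve(2, [0, -2], [1, -1]): A returns 2, B returns 0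
import Mathlib
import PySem

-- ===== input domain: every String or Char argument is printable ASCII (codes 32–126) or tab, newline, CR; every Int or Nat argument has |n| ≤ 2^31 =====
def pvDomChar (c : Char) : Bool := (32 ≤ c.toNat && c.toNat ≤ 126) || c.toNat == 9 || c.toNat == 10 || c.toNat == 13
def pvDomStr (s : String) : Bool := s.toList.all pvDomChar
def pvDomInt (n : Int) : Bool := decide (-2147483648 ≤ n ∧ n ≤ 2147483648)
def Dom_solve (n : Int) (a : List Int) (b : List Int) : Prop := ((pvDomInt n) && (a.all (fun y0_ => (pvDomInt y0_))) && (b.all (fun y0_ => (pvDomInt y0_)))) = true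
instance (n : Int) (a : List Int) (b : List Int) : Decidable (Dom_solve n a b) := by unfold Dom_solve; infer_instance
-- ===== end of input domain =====

-- B replaces A's per-cell range sum over the previous DP row by one running prefix sum per row
-- (and keeps a single row instead of the whole table): an asymptotic speed-up, same results.

-- ===== PORT A =====
def solve (n : Int) (a : List Int) (b : List Int) : Int :=
  let dp : List (List Int) :=
    (PySem.List.pyRange 0 (n+1) 1).map (fun _ => (PySem.List.pyRange 0 3001 1).map (fun _ => (0:Int)))
  let dp := (PySem.List.pyRange 1 (n+1) 1).foldl (fun dp i =>
    (PySem.List.pyRange (PySem.List.pyGetD a (i-1) 0) (PySem.List.pyGetD b (i-1) 0 + 1) 1).foldl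
      (fun dp j =>
        if i = 1 then
          PySem.List.pySetD dp i (PySem.List.pySetD (PySem.List.pyGetD dp i []) j 1)
        else
          PySem.List.pySetD dp i (PySem.List.pySetD (PySem.List.pyGetD dp i []) j
            (PySem.Int.mod (PySem.List.slice (PySem.List.pyGetD dp (i-1) [])
              (some (PySem.List.pyGetD a (i-2) 0)) (some (j+1))).sum 998244353)))
      dp) dp
  PySem.Int.mod (PySem.List.pyGetD dp n []).sum 998244353

-- ===== PORT B =====
def solve_alt (n : Int) (a : List Int) (b : List Int) : Int :=
  if n = 0 then 0
  else
    let prev0 : List Int := (PySem.List.pyRange 0 3001 1).map (fun j =>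
        if PySem.List.pyGetD a 0 0 ≤ j ∧ j ≤ PySem.List.pyGetD b 0 0 then (1:Int) else 0)
    let prev := (PySem.List.pyRange 1 n 1).foldl (fun prev i =>
        ((PySem.List.pyRange 0 3001 1).foldl (fun (s : Int × List Int) j =>
            let pref := s.1 + PySem.List.pyGetD prev j 0
            (pref, s.2 ++ [if PySem.List.pyGetD a i 0 ≤ j ∧ j ≤ PySem.List.pyGetD b i 0
                           then PySem.Int.mod pref 998244353 else 0]))
          ((0:Int), ([] : List Int))).2) prev0
    PySem.Int.mod prev.sum 998244353

-- ===== PRECONDITION & SPEC =====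
-- Pre_ restricts to the natural domain of this DP (0 ≤ n ≤ len(a), len(b); every nonempty
-- bound pair inside the table, 0 ≤ a[i] and b[i] ≤ 3000): outside it A either raises
-- IndexError (n < 0, n > len, or a written index beyond 3000) or silently writes counts
-- through Python's negative-index wraparound, an artefact of A's fixed 3001-wide rows.
def Pre_solve (n : Int) (a : List Int) (b : List Int) : Prop :=
  0 ≤ n ∧ n ≤ (a.length : Int) ∧ n ≤ (b.length : Int) ∧
    ∀ i < n.toNat, (a.getD i 0 ≤ b.getD i 0 → 0 ≤ a.getD i 0 ∧ b.getD i 0 ≤ 3000)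
instance (n : Int) (a : List Int) (b : List Int) : Decidable (Pre_solve n a b) := by
  unfold Pre_solve; infer_instance

def pvWitness_solve : Int × List Int × List Int := (2, [1, 0], [2, 3])

def Spec_solve (n : Int) (a : List Int) (b : List Int) (out : Int) : Prop := out = solve_alt n a b
instance (n : Int) (a : List Int) (b : List Int) (out : Int) : Decidable (Spec_solve n a b out) := by
  unfold Spec_solve; infer_instance

-- ===== CLAIM (what is proved, stated in full; the proofs are below) =====
def Claim_equal_solve : Prop := ∀ (n : Int) (a : List Int) (b : List Int), Dom_solve n a b → Pre_solve n a b → Spec_solve n a b (solve n a b)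

-- ===== LEMMAS AND PROOFS =====

-- a DP row: value g j inside [lo, hi], 0 outside, width 3001
def pvRow (lo hi : Int) (g : Nat → Int) : List Int :=
  (List.range 3001).map (fun (j : Nat) => if lo ≤ (j:Int) ∧ (j:Int) ≤ hi then g j else 0)

def pvZeros : List Int := (List.range 3001).map (fun _ => (0:Int))

-- the in-range value of row k (1-based row k+1) of the DP
def pvG (a b : List Int) : Nat → Nat → Int
  | 0 => fun _ => 1
  | (k+1) => fun j =>
      PySem.Int.mod (((pvRow (a.getD k 0) (b.getD k 0) (pvG a b k)).take (j+1)).sum) 998244353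

def pvRows (a b : List Int) (k : Nat) : List Int :=
  pvRow (a.getD k 0) (b.getD k 0) (pvG a b k)

-- A's dp table after rows 1..m have been processed (table height N+1)
def pvDpA (a b : List Int) (N m : Nat) : List (List Int) :=
  (List.range (N+1)).map (fun r => if 1 ≤ r ∧ r ≤ m then pvRows a b (r-1) else pvZeros)

lemma pv_map_getD (l : List Int) : (List.range l.length).map (fun j => l.getD j 0) = l := by
  apply List.ext_getElem <;> simp [List.getD_eq_getElem?_getD]
  intro i h1 h2; rw [List.getElem?_eq_getElem h2]; rfl

lemma pv_take_succ_sum (l : List Int) (N : Nat) :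
    (l.take (N+1)).sum = (l.take N).sum + l.getD N 0 := by
  rw [List.take_add_one, List.sum_append, List.getD_eq_getElem?_getD]
  cases l[N]? <;> simp

lemma pv_row_take_sum_zero (lo hi : Int) (g : Nat → Int) (p : Nat) (hp : (p:Int) ≤ lo) :
    (((pvRow lo hi g)).take p).sum = 0 := by
  rw [pvRow, ← List.map_take, List.take_range]
  apply List.sum_eq_zero
  intro x hx
  obtain ⟨j, hj, rfl⟩ := List.mem_map.1 hx
  rw [List.mem_range] at hj
  rw [if_neg]
  rintro ⟨hj1, -⟩
  have : (j:Int) < (p:Int) := by exact_mod_cast (by omega : j < p)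
  omega

lemma pv_row_empty (lo hi : Int) (g : Nat → Int) (h : hi < lo) : pvRow lo hi g = pvZeros := by
  rw [pvRow, pvZeros]
  apply List.map_congr_left
  intro j _
  rw [if_neg]
  rintro ⟨h1, h2⟩; omega

lemma pv_zeros_sum : pvZeros.sum = 0 := by
  apply List.sum_eq_zero
  intro x hx
  rw [pvZeros] at hx
  obtain ⟨j, hj, rfl⟩ := List.mem_map.1 hx
  rfl

lemma pv_slice_sum (lo hi : Int) (g : Nat → Int) (hwf : lo ≤ hi → 0 ≤ lo ∧ hi ≤ 3000) (j : Nat) :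
    (PySem.List.slice (pvRow lo hi g) (some lo) (some ((j:Int)+1))).sum
      = ((pvRow lo hi g).take (j+1)).sum := by
  by_cases hne : lo ≤ hi
  · obtain ⟨h0, h3⟩ := hwf hne
    rw [PySem.List.slice_toNat _ h0 (by positivity)]
    have hj1 : ((j:Int)+1).toNat = j + 1 := by omega
    rw [hj1]
    by_cases hple : lo.toNat ≤ j + 1
    · have hsplit : (pvRow lo hi g).take (j+1) =
          (pvRow lo hi g).take lo.toNat ++ (List.take (j+1-lo.toNat) ((pvRow lo hi g).drop lo.toNat)) := by
        rw [← List.take_add]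
        congr 1
        omega
      rw [hsplit, List.sum_append, pv_row_take_sum_zero lo hi g lo.toNat (by omega)]
      ring
    · have h1 : j + 1 - lo.toNat = 0 := by omega
      rw [h1, pv_row_take_sum_zero lo hi g (j+1) (by push_cast; omega)]
      simp
  · rw [not_le] at hne
    rw [pv_row_empty lo hi g hne]
    have hz : ∀ x ∈ pvZeros, x = (0:Int) := by
      intro x hx
      rw [pvZeros] at hx
      obtain ⟨t, ht, rfl⟩ := List.mem_map.1 hx
      rfl
    rw [List.sum_eq_zero (fun x hx => hz x (PySem.List.mem_of_mem_slice _ _ _ hx)),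
      List.sum_eq_zero (fun x hx => hz x (List.mem_of_mem_take hx))]

lemma pv_fold_set (g : List Int → Int → Int) (i : Int) (iN : Nat) (hic : i = (iN:Int)) (h1 : 1 ≤ iN) :
    ∀ (js : List Int) (dp : List (List Int)), iN < dp.length →
      js.foldl (fun dp j => PySem.List.pySetD dp i (PySem.List.pySetD (PySem.List.pyGetD dp i []) j
          (g (PySem.List.pyGetD dp (i-1) []) j))) dp
        = dp.set iN (js.foldl (fun row j => PySem.List.pySetD row j (g (dp.getD (iN-1) []) j))
            (dp.getD iN [])) := by
  subst hic
  intro js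
  induction js with
  | nil =>
    intro dp hlen
    simp only [List.foldl_nil]
    rw [List.getD_eq_getElem?_getD, List.getElem?_eq_getElem hlen]
    simp [List.set_getElem_self]
  | cons j js ih =>
    intro dp hlen
    have hcast : ((iN:Int)) - 1 = ((iN - 1 : Nat) : Int) := by omega
    simp only [List.foldl_cons]
    have hR : PySem.List.pySetD dp ((iN:Nat):Int) (PySem.List.pySetD (PySem.List.pyGetD dp ((iN:Nat):Int) []) j
          (g (PySem.List.pyGetD dp (((iN:Nat):Int)-1) []) j))
        = dp.set iN (PySem.List.pySetD (dp.getD iN []) j (g (dp.getD (iN-1) []) j)) := by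
      rw [hcast, PySem.List.pySetD_natCast, PySem.List.pyGetD_natCast, PySem.List.pyGetD_natCast]
    rw [hR, ih _ (by simpa using hlen)]
    have hg1 : (dp.set iN (PySem.List.pySetD (dp.getD iN []) j (g (dp.getD (iN-1) []) j))).getD (iN-1) []
        = dp.getD (iN-1) [] := by
      rw [List.getD_eq_getElem?_getD, List.getElem?_set, if_neg (by omega), ← List.getD_eq_getElem?_getD]
    have hg2 : (dp.set iN (PySem.List.pySetD (dp.getD iN []) j (g (dp.getD (iN-1) []) j))).getD iN []
        = PySem.List.pySetD (dp.getD iN []) j (g (dp.getD (iN-1) []) j) := by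
      rw [List.getD_eq_getElem?_getD, List.getElem?_set, if_pos rfl, if_pos hlen]
      rfl
    rw [hg1, hg2, List.set_set]

lemma pv_build_row (g : Int → Int) (c : Nat) :
    ∀ (lo : Int) (l : List Int), 0 ≤ lo → l.length = 3001 → lo + c ≤ 3001 →
      (PySem.List.pyRange lo (lo + c) 1).foldl (fun row j => PySem.List.pySetD row j (g j)) l
        = (List.range 3001).map (fun (j : Nat) => if lo ≤ (j:Int) ∧ (j:Int) < lo + c then g (j:Int) else l.getD j 0) := by
  induction c with
  | zero =>
    intro lo l h0 hlen hle
    rw [Nat.cast_zero, add_zero, PySem.List.pyRange_one_eq_nil le_rfl]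
    simp only [List.foldl_nil]
    have hmap : (List.range 3001).map (fun (j : Nat) => if lo ≤ (j:Int) ∧ (j:Int) < lo then g (j:Int) else l.getD j 0)
        = (List.range 3001).map (fun (j : Nat) => l.getD j 0) :=
      List.map_congr_left (fun j _ => by rw [if_neg]; omega)
    rw [hmap, ← hlen, pv_map_getD]
  | succ c ih =>
    intro lo l h0 hlen hle
    rw [show lo + ((c+1:Nat):Int) = lo + 1 + (c:Int) by push_cast; ring] at hle ⊢
    rw [PySem.List.pyRange_one_cons (by omega), List.foldl_cons,
      PySem.List.pySetD_of_nonneg l (g lo) h0]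
    refine (ih (lo+1) (l.set lo.toNat (g lo)) (by omega) (by simp [hlen]) hle).trans ?_
    apply List.map_congr_left
    intro j hj
    rw [List.mem_range] at hj
    have hset : (l.set lo.toNat (g lo)).getD j 0 = if j = lo.toNat then g lo else l.getD j 0 := by
      rw [List.getD_eq_getElem?_getD, List.getElem?_set]
      by_cases hj' : lo.toNat = j
      · rw [if_pos hj', if_pos (by omega), if_pos hj'.symm]
        rfl
      · rw [if_neg hj', if_neg (fun h => hj' h.symm), ← List.getD_eq_getElem?_getD]
    by_cases hjlo : (j:Int) = lo
    · rw [if_neg (by omega), if_pos (by omega), hset, if_pos (by omega), hjlo]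
    · have hcond : (lo + 1 ≤ (j:Int) ∧ (j:Int) < lo + 1 + (c:Int)) ↔ (lo ≤ (j:Int) ∧ (j:Int) < lo + 1 + (c:Int)) := by
        omega
      simp only [hset, if_neg (show ¬ j = lo.toNat by omega), hcond]

lemma pv_set_map_range {α : Type} (f : Nat → α) (n k : Nat) (v : α) :
    ((List.range n).map f).set k v = (List.range n).map (fun r => if r = k then v else f r) := by
  apply List.ext_getElem
  · simp
  · intro i h1 h2
    rw [List.getElem_set]
    simp at h1 h2 ⊢
    by_cases hik : k = i <;> simp [hik]
    exact fun h' => absurd h'.symm hik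

lemma pv_b_inner (prev : List Int) (lo hi : Int) (N : Nat) :
    (PySem.List.pyRange 0 (N:Int) 1).foldl (fun (s : Int × List Int) j =>
        (s.1 + PySem.List.pyGetD prev j 0,
         s.2 ++ [if lo ≤ j ∧ j ≤ hi
                 then PySem.Int.mod (s.1 + PySem.List.pyGetD prev j 0) 998244353 else 0]))
      ((0:Int), ([] : List Int))
    = ((prev.take N).sum,
       (List.range N).map (fun (j : Nat) => if lo ≤ (j:Int) ∧ (j:Int) ≤ hi
          then PySem.Int.mod ((prev.take (j+1)).sum) 998244353 else 0)) := by
  induction N with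
  | zero =>
    rw [Nat.cast_zero, PySem.List.pyRange_one_eq_nil le_rfl]
    simp
  | succ N ih =>
    rw [Nat.cast_succ, PySem.List.pyRange_one_succ_right (by positivity), List.foldl_append,
      ih, List.foldl_cons, List.foldl_nil, PySem.List.pyGetD_natCast, ← pv_take_succ_sum,
      List.range_succ, List.map_append]
    rfl

lemma pv_b_outer (a b : List Int) (k : Nat) :
    (PySem.List.pyRange 1 ((k:Int)+1) 1).foldl (fun prev i =>
        ((PySem.List.pyRange 0 3001 1).foldl (fun (s : Int × List Int) j =>
            (s.1 + PySem.List.pyGetD prev j 0,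
             s.2 ++ [if PySem.List.pyGetD a i 0 ≤ j ∧ j ≤ PySem.List.pyGetD b i 0
                     then PySem.Int.mod (s.1 + PySem.List.pyGetD prev j 0) 998244353 else 0]))
          ((0:Int), ([] : List Int))).2) (pvRows a b 0)
    = pvRows a b k := by
  induction k with
  | zero =>
    rw [Nat.cast_zero, zero_add, PySem.List.pyRange_one_eq_nil le_rfl, List.foldl_nil]
  | succ k ih =>
    rw [Nat.cast_succ, show ((k:Int)+1+1) = ((k:Int)+1)+1 by ring,
      PySem.List.pyRange_one_succ_right (by omega), List.foldl_append, ih, List.foldl_cons,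
      List.foldl_nil, show ((k:Int)+1) = ((k+1:Nat):Int) by push_cast; ring,
      show (3001:Int) = ((3001:Nat):Int) by norm_num, PySem.List.pyGetD_natCast,
      PySem.List.pyGetD_natCast, pv_b_inner]
    conv_rhs => rw [pvRows, pvRow]
    apply List.map_congr_left
    intro j hj
    rw [pvG, pvRows]

lemma pv_prev0 (a b : List Int) :
    ((PySem.List.pyRange 0 3001 1).map (fun j =>
        if PySem.List.pyGetD a 0 0 ≤ j ∧ j ≤ PySem.List.pyGetD b 0 0 then (1:Int) else 0))
      = pvRows a b 0 := by
  rw [pvRows, pvRow, show (3001:Int) = ((3001:Nat):Int) by norm_num, PySem.List.pyRange_zero_nat,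
    List.map_map]
  apply List.map_congr_left
  intro j hj
  simp [PySem.List.pyGetD_zero, pvG]

lemma pv_zeros_getD (j : Nat) : pvZeros.getD j 0 = 0 := by
  by_cases hj : j < 3001
  · rw [pvZeros, PySem.List.getD_map_range _ _ _ _ hj]
  · have hl : pvZeros.length = 3001 := by rw [pvZeros, List.length_map, List.length_range]
    exact List.getD_eq_default _ _ (by omega)

lemma pv_set_dpA (a b : List Int) (N m : Nat) :
    (pvDpA a b N m).set (m+1) (pvRows a b m) = pvDpA a b N (m+1) := by
  rw [pvDpA, pv_set_map_range, pvDpA]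
  apply List.map_congr_left
  intro r hr
  by_cases h : r = m+1
  · rw [if_pos h, if_pos (by omega)]
    subst h
    rw [Nat.add_sub_cancel]
  · rw [if_neg h]
    have hiff : (1 ≤ r ∧ r ≤ m) ↔ (1 ≤ r ∧ r ≤ m+1) := by omega
    simp only [hiff]

lemma pv_a_step (a b : List Int) (N m : Nat) (hm : m < N)
    (hb : a.getD m 0 ≤ b.getD m 0 → 0 ≤ a.getD m 0 ∧ b.getD m 0 ≤ 3000)
    (hb' : 1 ≤ m → (a.getD (m-1) 0 ≤ b.getD (m-1) 0 → 0 ≤ a.getD (m-1) 0 ∧ b.getD (m-1) 0 ≤ 3000)) :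
    (PySem.List.pyRange (PySem.List.pyGetD a (((m:Int)+1)-1) 0) (PySem.List.pyGetD b (((m:Int)+1)-1) 0 + 1) 1).foldl
      (fun dp j =>
        if ((m:Int)+1) = 1 then
          PySem.List.pySetD dp ((m:Int)+1) (PySem.List.pySetD (PySem.List.pyGetD dp ((m:Int)+1) []) j 1)
        else
          PySem.List.pySetD dp ((m:Int)+1) (PySem.List.pySetD (PySem.List.pyGetD dp ((m:Int)+1) []) j
            (PySem.Int.mod (PySem.List.slice (PySem.List.pyGetD dp (((m:Int)+1)-1) [])
              (some (PySem.List.pyGetD a (((m:Int)+1)-2) 0)) (some (j+1))).sum 998244353)))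

      (pvDpA a b N m)
    = pvDpA a b N (m+1) := by
  have hlen : (pvDpA a b N m).length = N + 1 := by
    rw [pvDpA, List.length_map, List.length_range]
  have hget1 : (pvDpA a b N m).getD (m+1) [] = pvZeros := by
    rw [pvDpA, PySem.List.getD_map_range _ _ _ _ (by omega), if_neg (by omega)]
  have hzl : pvZeros.length = 3001 := by rw [pvZeros, List.length_map, List.length_range]
  have hc1 : ((m:Int)+1)-1 = ((m:Nat):Int) := by ring
  by_cases hm0 : m = 0
  · subst hm0
    simp only [Nat.cast_zero, zero_add]
    simp only [if_true]
    rw [pv_fold_set (fun _ _ => (1:Int)) 1 1 (by norm_num) le_rfl _ _ (by rw [hlen]; omega)]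
    rw [hget1, show (1:Int)-1 = ((0:Nat):Int) by norm_num,
      PySem.List.pyGetD_natCast, PySem.List.pyGetD_natCast]
    by_cases hab : a.getD 0 0 ≤ b.getD 0 0
    · obtain ⟨hlo, hhi⟩ := hb hab
      have hc : a.getD 0 0 + (((b.getD 0 0 + 1 - a.getD 0 0).toNat : Nat) : Int) = b.getD 0 0 + 1 := by
        omega
      rw [← hc, pv_build_row _ _ _ _ hlo hzl (by omega)]
      have hrow : (List.range 3001).map (fun (j:Nat) =>
            if a.getD 0 0 ≤ (j:Int) ∧ (j:Int) < a.getD 0 0 + (((b.getD 0 0 + 1 - a.getD 0 0).toNat : Nat) : Int)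
            then (1:Int) else pvZeros.getD j 0) = pvRows a b 0 := by
        conv_rhs => rw [pvRows, pvRow]
        apply List.map_congr_left
        intro j hj
        rw [hc, pv_zeros_getD]
        have hiff : (a.getD 0 0 ≤ (j:Int) ∧ (j:Int) < b.getD 0 0 + 1)
            ↔ (a.getD 0 0 ≤ (j:Int) ∧ (j:Int) ≤ b.getD 0 0) := by omega
        simp only [hiff, pvG]
      rw [hrow]
      exact pv_set_dpA a b N 0
    · rw [PySem.List.pyRange_one_eq_nil (by omega), List.foldl_nil,
        show pvZeros = pvRows a b 0 from by rw [pvRows]; exact (pv_row_empty _ _ _ (by omega)).symm]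
      exact pv_set_dpA a b N 0
  · have hm1 : 1 ≤ m := Nat.one_le_iff_ne_zero.2 hm0
    have hne : ¬ ((m:Int)+1 = 1) := by omega
    simp only [if_neg hne]
    have hc2 : ((m:Int)+1)-2 = ((m-1:Nat):Int) := by rw [Nat.cast_sub hm1]; push_cast; ring
    rw [hc2, PySem.List.pyGetD_natCast]
    rw [pv_fold_set (fun prev j => PySem.Int.mod (PySem.List.slice prev (some (a.getD (m-1) 0)) (some (j+1))).sum 998244353)
        ((m:Int)+1) (m+1) (by push_cast; ring) (by omega) _ _ (by rw [hlen]; omega)]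
    rw [hget1, hc1, PySem.List.pyGetD_natCast, PySem.List.pyGetD_natCast]
    have hgetm : (pvDpA a b N m).getD (m+1-1) [] = pvRows a b (m-1) := by
      rw [Nat.add_sub_cancel, pvDpA, PySem.List.getD_map_range _ _ _ _ (by omega), if_pos ⟨hm1, le_rfl⟩]
    rw [hgetm]
    by_cases hab : a.getD m 0 ≤ b.getD m 0
    · obtain ⟨hlo, hhi⟩ := hb hab
      have hc : a.getD m 0 + (((b.getD m 0 + 1 - a.getD m 0).toNat : Nat) : Int) = b.getD m 0 + 1 := by
        omega
      rw [← hc, pv_build_row _ _ _ _ hlo hzl (by omega)]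
      have hrow : (List.range 3001).map (fun (j:Nat) =>
            if a.getD m 0 ≤ (j:Int) ∧ (j:Int) < a.getD m 0 + (((b.getD m 0 + 1 - a.getD m 0).toNat : Nat) : Int)
            then PySem.Int.mod (PySem.List.slice (pvRows a b (m-1)) (some (a.getD (m-1) 0)) (some ((j:Int)+1))).sum 998244353
            else pvZeros.getD j 0) = pvRows a b m := by
        conv_rhs => rw [pvRows, pvRow]
        apply List.map_congr_left
        intro j hj
        rw [hc, pv_zeros_getD]
        have hiff : (a.getD m 0 ≤ (j:Int) ∧ (j:Int) < b.getD m 0 + 1)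
            ↔ (a.getD m 0 ≤ (j:Int) ∧ (j:Int) ≤ b.getD m 0) := by omega
        simp only [hiff]
        rw [pvRows, pv_slice_sum _ _ _ (hb' hm1) j]
        have hms : m = (m-1) + 1 := by omega
        rw [hms, pvG]
        simp
      rw [hrow]
      exact pv_set_dpA a b N m
    · rw [PySem.List.pyRange_one_eq_nil (by omega), List.foldl_nil,
        show pvZeros = pvRows a b m from by rw [pvRows]; exact (pv_row_empty _ _ _ (by omega)).symm]
      exact pv_set_dpA a b N m

lemma pv_a_fold (a b : List Int) (N : Nat)
    (hpre : ∀ i < N, (a.getD i 0 ≤ b.getD i 0 → 0 ≤ a.getD i 0 ∧ b.getD i 0 ≤ 3000)) :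
    ∀ m, m ≤ N →
      (PySem.List.pyRange 1 ((m:Int)+1) 1).foldl (fun dp i =>
        (PySem.List.pyRange (PySem.List.pyGetD a (i-1) 0) (PySem.List.pyGetD b (i-1) 0 + 1) 1).foldl
          (fun dp j =>
            if i = 1 then
              PySem.List.pySetD dp i (PySem.List.pySetD (PySem.List.pyGetD dp i []) j 1)
            else
              PySem.List.pySetD dp i (PySem.List.pySetD (PySem.List.pyGetD dp i []) j
                (PySem.Int.mod (PySem.List.slice (PySem.List.pyGetD dp (i-1) [])
                  (some (PySem.List.pyGetD a (i-2) 0)) (some (j+1))).sum 998244353)))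
          dp) (pvDpA a b N 0)
      = pvDpA a b N m := by
  intro m
  induction m with
  | zero =>
    intro _
    rw [Nat.cast_zero, zero_add, PySem.List.pyRange_one_eq_nil le_rfl, List.foldl_nil]
  | succ m ih =>
    intro hmN
    rw [Nat.cast_succ, show ((m:Int)+1+1) = ((m:Int)+1)+1 by ring,
      PySem.List.pyRange_one_succ_right (by omega), List.foldl_append, ih (by omega),
      List.foldl_cons, List.foldl_nil]
    exact pv_a_step a b N m (by omega) (hpre m (by omega)) (fun h1 => hpre (m-1) (by omega))

set_option maxRecDepth 8000 in
lemma pv_dp0 (a b : List Int) (N : Nat) :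
    ((PySem.List.pyRange 0 ((N:Int)+1) 1).map (fun _ => (PySem.List.pyRange 0 3001 1).map (fun _ => (0:Int))))
      = pvDpA a b N 0 := by
  rw [show ((N:Int)+1) = ((N+1:Nat):Int) by push_cast; ring, PySem.List.pyRange_zero_nat,
    show (3001:Int) = ((3001:Nat):Int) by norm_num, PySem.List.pyRange_zero_nat,
    List.map_map, List.map_map, pvDpA]
  apply List.map_congr_left
  intro r hr
  rw [if_neg (by omega), pvZeros]
  exact List.map_congr_left (fun t _ => rfl)

-- ===== VERDICT (by name: the statement is the Claim_ definition above) =====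
theorem solve_spec : Claim_equal_solve := by
  intro n a b hdom hpre
  obtain ⟨h0, hla, hlb, hbnd⟩ := hpre
  unfold Spec_solve
  obtain ⟨N, rfl⟩ : ∃ N : Nat, n = (N:Int) := ⟨n.toNat, (Int.toNat_of_nonneg h0).symm⟩
  have hbnd' : ∀ i < N, (a.getD i 0 ≤ b.getD i 0 → 0 ≤ a.getD i 0 ∧ b.getD i 0 ≤ 3000) := by
    intro i hi
    exact hbnd i (by simpa using hi)
  have hA : solve ((N:Int)) a b = PySem.Int.mod ((pvDpA a b N N).getD N []).sum 998244353 := by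
    simp only [solve]
    rw [pv_dp0 a b N, pv_a_fold a b N hbnd' N le_rfl, PySem.List.pyGetD_natCast]
  cases N with
  | zero =>
    rw [hA, show (pvDpA a b 0 0).getD 0 [] = pvZeros from by
        rw [pvDpA, PySem.List.getD_map_range _ _ _ _ (by omega), if_neg (by omega)],
      pv_zeros_sum, Nat.cast_zero]
    simp only [solve_alt, if_true]
    decide
  | succ m =>
    rw [hA, show (pvDpA a b (m+1) (m+1)).getD (m+1) [] = pvRows a b m from by
        rw [pvDpA, PySem.List.getD_map_range _ _ _ _ (by omega), if_pos ⟨by omega, le_rfl⟩,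
          Nat.add_sub_cancel]]
    simp only [solve_alt, if_neg (show ¬ (((m+1:Nat):Int) = 0) by omega)]
    rw [pv_prev0, show ((m+1:Nat):Int) = (m:Int)+1 by push_cast; ring, pv_b_outer a b m]
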